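-- pv_equiv track=rewrite | github.com/lekr10/ff-draft-26 | app.py | r1_tally
-- ===== SOURCE A (Python) =====
-- CITIES = [
--     "Vancouver",
--     "Park City",
--     "Charleston beach house",
--     "Miami",
-- ]
--
-- def r1_tally(d):
--     counts = {c: 0 for c in CITIES}
--     by_city = {c: [] for c in CITIES}
--     for name, picks in d["round1_votes"].items():
--         for c in picks:
--             if c in counts:
--                 counts[c] += 1
--                 by_city[c].append(name)
--     return counts, by_city
-- ===== SOURCE B (Python) =====
-- CITIES = [
--     "Vancouver",
--     "Park City",
--     "Charleston beach house",
--     "Miami",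
-- ]
--
-- def r1_tally(d):
--     votes = d["round1_votes"]
--     by_city = {
--         c: [name for name, picks in votes.items() for p in picks if p == c]
--         for c in CITIES
--     }
--     counts = {c: len(v) for c, v in by_city.items()}
--     return counts, by_city
-- ===== Notes on version B (the rewrite author's own statement) =====
-- stated objective: simpler
-- what changed: Instead of threading two mutable dicts through a voter-outer loop with a membership guard, B loops city-outer: for each city it collects the voter names with one comprehension over the votes, and derives the counts afterwards as the lengths of those lists.
import Mathlib
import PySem

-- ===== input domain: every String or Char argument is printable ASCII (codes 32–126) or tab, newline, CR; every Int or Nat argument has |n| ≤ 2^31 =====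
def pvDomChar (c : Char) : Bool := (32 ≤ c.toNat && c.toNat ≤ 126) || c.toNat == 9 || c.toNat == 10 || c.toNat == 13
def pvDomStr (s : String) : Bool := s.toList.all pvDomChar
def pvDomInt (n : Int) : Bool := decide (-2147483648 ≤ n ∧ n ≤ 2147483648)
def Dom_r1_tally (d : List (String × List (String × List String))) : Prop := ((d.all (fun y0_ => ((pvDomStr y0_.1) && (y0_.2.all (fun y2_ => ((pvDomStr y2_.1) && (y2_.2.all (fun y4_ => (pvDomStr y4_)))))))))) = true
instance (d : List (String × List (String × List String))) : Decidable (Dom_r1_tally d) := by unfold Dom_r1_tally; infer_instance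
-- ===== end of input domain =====

-- B changes the decomposition: one comprehension per city (city-outer) instead of two dicts
-- mutated inside a voter-outer loop; counts are derived afterwards from the lists' lengths.

-- ===== PORT A =====
def CITIES : List String :=
  ["Vancouver", "Park City", "Charleston beach house", "Miami"]

-- one step of A's inner 'for c in picks' body (name is the current voter)
def aStep (name : String) (st : PySem.Dict String Int × PySem.Dict String (List String))
    (c : String) : PySem.Dict String Int × PySem.Dict String (List String) :=
  if st.1.contains c then
    (st.1.insert c (st.1.getD c 0 + 1), st.2.insert c (st.2.getD c [] ++ [name]))
  else st

def r1_tally (d : List (String × List (String × List String))) : (List (String × Int)) × (List (String × List String)) :=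
  -- d["round1_votes"] raises KeyError when the key is absent: that input is outside Pre_
  match (PySem.Dict.mk d).get? "round1_votes" with
  | none => ([], [])
  | some votes =>
    let counts : PySem.Dict String Int := PySem.Dict.ofList (CITIES.map (fun c => (c, 0)))
    let by_city : PySem.Dict String (List String) := PySem.Dict.ofList (CITIES.map (fun c => (c, [])))
    let res := votes.foldl (fun st p => p.2.foldl (aStep p.1) st) (counts, by_city)
    (res.1.items, res.2.items)

-- ===== PORT B =====
-- [name for name, picks in votes.items() for p in picks if p == c]
def namesFor (votes : List (String × List String)) (c : String) : List String :=
  votes.flatMap (fun p => (p.2.filter (fun x => x == c)).map (fun _ => p.1))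

def r1_tally_alt (d : List (String × List (String × List String))) : (List (String × Int)) × (List (String × List String)) :=
  match (PySem.Dict.mk d).get? "round1_votes" with
  | none => ([], [])
  | some votes =>
    -- dict comprehensions keyed by the (distinct) CITIES are assoc lists in that order
    let by_city : List (String × List String) := CITIES.map (fun c => (c, namesFor votes c))
    let counts : List (String × Int) := by_city.map (fun p => (p.1, (p.2.length : Int)))
    (counts, by_city)

-- ===== PRECONDITION & SPEC =====
-- A (and B) raise KeyError when the key "round1_votes" is absent; Pre_ requires it to be present.
def Pre_r1_tally (d : List (String × List (String × List String))) : Prop :=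
  ((PySem.Dict.mk d).get? "round1_votes").isSome = true
instance (d : List (String × List (String × List String))) : Decidable (Pre_r1_tally d) := by unfold Pre_r1_tally; infer_instance

def pvWitness_r1_tally : (List (String × List (String × List String))) :=
  [("round1_votes", [("al", ["Miami", "Vancouver", "Miami"]), ("bo", ["Park City"])])]

def Spec_r1_tally (d : List (String × List (String × List String))) (out : (List (String × Int)) × (List (String × List String))) : Prop := out = r1_tally_alt d
instance (d : List (String × List (String × List String))) (out : (List (String × Int)) × (List (String × List String))) : Decidable (Spec_r1_tally d out) := by unfold Spec_r1_tally; infer_instance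

-- ===== CLAIM (what is proved, stated in full; the proofs are below) =====
def Claim_equal_r1_tally : Prop := ∀ (d : List (String × List (String × List String))), Dom_r1_tally d → Pre_r1_tally d → Spec_r1_tally d (r1_tally d)

-- ===== LEMMAS AND PROOFS =====

-- items of a dict with Nodup keys are determined by its keys and getD
theorem items_eq_keys_map {κ ν : Type} [BEq κ] [LawfulBEq κ] (d : PySem.Dict κ ν) (d0 : ν)
    (h : d.keys.Nodup) : d.items = d.keys.map (fun k => (k, d.getD k d0)) := by
  have h1 : d.items.map (fun p => (p.1, d.getD p.1 d0)) = d.items := by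
    conv_rhs => rw [← List.map_id d.items]
    apply List.map_congr_left
    intro p hp
    have := PySem.Dict.getD_of_mem_items d (k := p.1) (v := p.2) (by simpa using hp) h d0
    simp [this]
  calc d.items = d.items.map (fun p => (p.1, d.getD p.1 d0)) := h1.symm
    _ = d.keys.map (fun k => (k, d.getD k d0)) := by
        simp [PySem.Dict.keys, List.map_map]

-- the inner loop over picks: keys are preserved and getD accumulates per occurrence
theorem inner_invariant (name : String) (picks : List String)
    (cnt : PySem.Dict String Int) (byc : PySem.Dict String (List String))
    (h1 : cnt.keys = CITIES) (h2 : byc.keys = CITIES) :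
    (picks.foldl (aStep name) (cnt, byc)).1.keys = CITIES ∧
    (picks.foldl (aStep name) (cnt, byc)).2.keys = CITIES ∧
    (∀ c ∈ CITIES,
      (picks.foldl (aStep name) (cnt, byc)).1.getD c 0
        = cnt.getD c 0 + ((picks.filter (fun x => x == c)).length : Int) ∧
      (picks.foldl (aStep name) (cnt, byc)).2.getD c []
        = byc.getD c [] ++ (picks.filter (fun x => x == c)).map (fun _ => name)) := by
  induction picks generalizing cnt byc with
  | nil => simp [h1, h2]
  | cons x picks ih =>
    simp only [List.foldl_cons]
    by_cases hx : cnt.contains x = true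
    · have hx2 : byc.contains x = true := by
        rw [PySem.Dict.contains_iff_mem_keys, h2]
        rw [PySem.Dict.contains_iff_mem_keys, h1] at hx; exact hx
      have hstep : aStep name (cnt, byc) x
          = (cnt.insert x (cnt.getD x 0 + 1), byc.insert x (byc.getD x [] ++ [name])) := by
        simp [aStep, hx]
      rw [hstep]
      have hk1 : (cnt.insert x (cnt.getD x 0 + 1)).keys = CITIES := by
        rw [PySem.Dict.keys_insert_of_contains _ _ hx, h1]
      have hk2 : (byc.insert x (byc.getD x [] ++ [name])).keys = CITIES := by
        rw [PySem.Dict.keys_insert_of_contains _ _ hx2, h2]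
      obtain ⟨g1, g2, g3⟩ := ih _ _ hk1 hk2
      refine ⟨g1, g2, ?_⟩
      intro c hc
      obtain ⟨e1, e2⟩ := g3 c hc
      constructor
      · rw [e1, PySem.Dict.getD_insert]
        by_cases hcx : c = x
        · subst hcx; simp; ring
        · simp [hcx, Ne.symm hcx]
      · rw [e2, PySem.Dict.getD_insert]
        by_cases hcx : c = x
        · subst hcx; simp
        · simp [hcx, Ne.symm hcx]
    · have hstep : aStep name (cnt, byc) x = (cnt, byc) := by simp [aStep, hx]
      rw [hstep]
      obtain ⟨g1, g2, g3⟩ := ih _ _ h1 h2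
      refine ⟨g1, g2, ?_⟩
      intro c hc
      obtain ⟨e1, e2⟩ := g3 c hc
      have hcx : x ≠ c := by
        intro h; subst h
        exact hx (by rw [PySem.Dict.contains_iff_mem_keys, h1]; exact hc)
      constructor
      · rw [e1]; simp [hcx]
      · rw [e2]; simp [hcx]

-- the outer loop over voters
theorem outer_invariant (votes : List (String × List String))
    (cnt : PySem.Dict String Int) (byc : PySem.Dict String (List String))
    (h1 : cnt.keys = CITIES) (h2 : byc.keys = CITIES) :
    (votes.foldl (fun st p => p.2.foldl (aStep p.1) st) (cnt, byc)).1.keys = CITIES ∧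
    (votes.foldl (fun st p => p.2.foldl (aStep p.1) st) (cnt, byc)).2.keys = CITIES ∧
    (∀ c ∈ CITIES,
      (votes.foldl (fun st p => p.2.foldl (aStep p.1) st) (cnt, byc)).1.getD c 0
        = cnt.getD c 0 + ((namesFor votes c).length : Int) ∧
      (votes.foldl (fun st p => p.2.foldl (aStep p.1) st) (cnt, byc)).2.getD c []
        = byc.getD c [] ++ namesFor votes c) := by
  induction votes generalizing cnt byc with
  | nil => simp [namesFor, h1, h2]
  | cons p votes ih =>
    simp only [List.foldl_cons]
    obtain ⟨i1, i2, i3⟩ := inner_invariant p.1 p.2 cnt byc h1 h2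
    obtain ⟨g1, g2, g3⟩ := ih _ _ i1 i2
    refine ⟨g1, g2, ?_⟩
    intro c hc
    obtain ⟨e1, e2⟩ := g3 c hc
    obtain ⟨f1, f2⟩ := i3 c hc
    constructor
    · rw [e1, f1]; simp [namesFor]; ring
    · rw [e2, f2]; simp [namesFor]

theorem r1_tally_eq (d : List (String × List (String × List String)))
    (hpre : Pre_r1_tally d) : r1_tally d = r1_tally_alt d := by
  unfold Pre_r1_tally at hpre
  obtain ⟨votes, hv⟩ := Option.isSome_iff_exists.mp hpre
  unfold r1_tally r1_tally_alt
  rw [hv]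
  simp only
  set cnt0 : PySem.Dict String Int := PySem.Dict.ofList (CITIES.map (fun c => (c, 0))) with hcnt0
  set byc0 : PySem.Dict String (List String) := PySem.Dict.ofList (CITIES.map (fun c => (c, []))) with hbyc0
  have hk1 : cnt0.keys = CITIES := by rw [hcnt0]; decide
  have hk2 : byc0.keys = CITIES := by rw [hbyc0]; decide
  obtain ⟨g1, g2, g3⟩ := outer_invariant votes cnt0 byc0 hk1 hk2
  have hnodup : CITIES.Nodup := by decide
  simp only [Prod.mk.injEq]
  constructor
  · rw [items_eq_keys_map _ 0 (by rw [g1]; exact hnodup), g1, List.map_map]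
    apply List.map_congr_left
    intro c hc
    obtain ⟨e1, _⟩ := g3 c hc
    have h0 : cnt0.getD c 0 = 0 := by
      rw [hcnt0]; fin_cases hc <;> decide
    simp [e1, h0]
  · rw [items_eq_keys_map _ [] (by rw [g2]; exact hnodup), g2]
    apply List.map_congr_left
    intro c hc
    obtain ⟨_, e2⟩ := g3 c hc
    have h0 : byc0.getD c [] = [] := by
      rw [hbyc0]; fin_cases hc <;> decide
    simp [e2, h0]

-- ===== VERDICT (by name: the statement is the Claim_ definition above) =====
theorem r1_tally_spec : Claim_equal_r1_tally := by
  intro d _ hpre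
  exact r1_tally_eq d hpre
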